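-- pv_equiv track=rewrite | github.com/vilavivida/Babeval | babeval/agreement_in_question/score.py | categorize_by_template
-- ===== SOURCE A (Python) =====
-- from typing import List
--
-- templates = ['main verb',
--              'auxiliary verb',
--              ]
--
-- def categorize_by_template(sentences_in, sentences_out: List[List[str]]):
--     """
--     differentiate sentences with or without "go"
--     :param sentences_in:
--     :param sentences_out:
--     :return:
--     """
--
--     res = {}
--     for s1, s2 in zip(sentences_in, sentences_out):
--         if set(s1).intersection(['go', 'do']):
--             res.setdefault(templates[0], []).append(s2)
--         else:
--             res.setdefault(templates[1], []).append(s2)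
--
--     return res
-- ===== SOURCE B (Python) =====
-- from typing import List
--
-- templates = ['main verb',
--              'auxiliary verb',
--              ]
--
-- def categorize_by_template(sentences_in, sentences_out: List[List[str]]):
--     # Label each pair once, then group with a dict comprehension over the
--     # distinct labels in first-occurrence order (dict.fromkeys).
--     def label(s1):
--         return 'main verb' if {'go', 'do'} & set(s1) else 'auxiliary verb'
--     labels = [label(s1) for s1, _ in zip(sentences_in, sentences_out)]
--     return {lab: [s2 for l, s2 in zip(labels, sentences_out) if l == lab]
--             for lab in dict.fromkeys(labels)}
-- ===== Notes on version B (the rewrite author's own statement) =====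
-- stated objective: idiomatic
-- what changed: A builds the dict in one pass with setdefault().append(); B first computes the label of every pair, then groups with a dict comprehension over the distinct labels (dict.fromkeys), filtering the labelled pairs once per distinct label.
import Mathlib
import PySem

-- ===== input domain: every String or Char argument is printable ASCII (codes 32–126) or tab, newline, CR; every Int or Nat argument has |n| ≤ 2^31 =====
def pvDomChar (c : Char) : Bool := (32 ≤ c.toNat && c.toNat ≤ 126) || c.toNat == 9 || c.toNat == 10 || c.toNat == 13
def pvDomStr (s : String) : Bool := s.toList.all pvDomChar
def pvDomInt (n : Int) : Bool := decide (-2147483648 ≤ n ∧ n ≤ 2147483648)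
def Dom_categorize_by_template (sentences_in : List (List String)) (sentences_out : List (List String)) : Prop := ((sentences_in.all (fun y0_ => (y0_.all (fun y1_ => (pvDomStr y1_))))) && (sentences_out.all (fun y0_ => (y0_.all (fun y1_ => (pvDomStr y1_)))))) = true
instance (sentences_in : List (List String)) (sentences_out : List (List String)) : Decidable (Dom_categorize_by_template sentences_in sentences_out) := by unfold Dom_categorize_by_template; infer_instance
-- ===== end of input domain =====

-- B replaces A's single setdefault-mutating loop by labelling each pair once and grouping via a
-- dict comprehension over the distinct labels in first-occurrence order; objective: idiomatic.


-- ===== PORT A =====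
-- templates[0] = "main verb", templates[1] = "auxiliary verb" (module constant, inlined).
-- res.setdefault(k, []).append(s2) = res.modify k [] (· ++ [s2])  (d[k] = d.get(k, []) + [s2]).
def categorize_by_template (sentences_in : List (List String)) (sentences_out : List (List String)) : List (String × List (List String)) :=
  let res : PySem.Dict String (List (List String)) :=
    (sentences_in.zip sentences_out).foldl
      (fun res p =>
        if PySem.Set.inter (PySem.Set.ofList p.1) ["go", "do"] ≠ [] then
          res.modify "main verb" [] (fun l => l ++ [p.2])
        else
          res.modify "auxiliary verb" [] (fun l => l ++ [p.2]))
      PySem.Dict.empty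
  res.items

-- ===== PORT B =====
-- Source B: label every zipped pair, then a dict comprehension over dict.fromkeys(labels)
-- (= PySem.List.dedup labels, first occurrences in order), filtering the labelled pairs per label.
-- '{go,do} & set(s1)' is only tested for truthiness, so its hash order is irrelevant.
def categorize_by_template_alt (sentences_in : List (List String)) (sentences_out : List (List String)) : List (String × List (List String)) :=
  let label : List String → String := fun s1 =>
    if PySem.Set.inter (PySem.Set.ofList ["go", "do"]) s1 ≠ [] then "main verb" else "auxiliary verb"
  let labels := (sentences_in.zip sentences_out).map (fun p => label p.1)
  (PySem.List.dedup labels).map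
    (fun lab => (lab, ((labels.zip sentences_out).filter (fun q => q.1 == lab)).map Prod.snd))

-- ===== PRECONDITION & SPEC =====
def Spec_categorize_by_template (sentences_in : List (List String)) (sentences_out : List (List String)) (out : List (String × List (List String))) : Prop := out = categorize_by_template_alt sentences_in sentences_out
instance (sentences_in : List (List String)) (sentences_out : List (List String)) (out : List (String × List (List String))) : Decidable (Spec_categorize_by_template sentences_in sentences_out out) := by unfold Spec_categorize_by_template; infer_instance

-- ===== CLAIM (what is proved, stated in full; the proofs are below) =====
def Claim_equal_categorize_by_template : Prop := ∀ (sentences_in : List (List String)) (sentences_out : List (List String)), Dom_categorize_by_template sentences_in sentences_out → Spec_categorize_by_template sentences_in sentences_out (categorize_by_template sentences_in sentences_out)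

-- ===== LEMMAS AND PROOFS =====

-- A's membership test, named for the proofs.
def pvIsM (s1 : List String) : Bool := decide (PySem.Set.inter (PySem.Set.ofList s1) ["go", "do"] ≠ [])

-- B's label function, named for the proofs.
def pvLab (s1 : List String) : String :=
  if PySem.Set.inter (PySem.Set.ofList ["go", "do"]) s1 ≠ [] then "main verb" else "auxiliary verb"

-- A's fold step, named for the proofs (identical to the lambda in port A).
def pvStep (res : PySem.Dict String (List (List String))) (p : List String × List String) : PySem.Dict String (List (List String)) :=
  if PySem.Set.inter (PySem.Set.ofList p.1) ["go", "do"] ≠ [] then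
    res.modify "main verb" [] (fun l => l ++ [p.2])
  else
    res.modify "auxiliary verb" [] (fun l => l ++ [p.2])

def pvMains (ps : List (List String × List String)) : List (List String) :=
  (ps.filter (fun p => pvIsM p.1)).map Prod.snd

def pvAuxs (ps : List (List String × List String)) : List (List String) :=
  (ps.filter (fun p => !pvIsM p.1)).map Prod.snd

-- the common normal form both ports are reduced to
def pvForm (ps : List (List String × List String)) : List (String × List (List String)) :=
  if pvMains ps ≠ [] ∧ pvAuxs ps ≠ [] then
    if pvIsM ps.headI.1 then
      [("main verb", pvMains ps), ("auxiliary verb", pvAuxs ps)]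
    else [("auxiliary verb", pvAuxs ps), ("main verb", pvMains ps)]
  else if pvMains ps ≠ [] then [("main verb", pvMains ps)]
  else if pvAuxs ps ≠ [] then [("auxiliary verb", pvAuxs ps)]
  else []

lemma pv_cond_iff (s1 : List String) :
    (PySem.Set.inter (PySem.Set.ofList s1) ["go", "do"] ≠ []) ↔ pvIsM s1 = true := by
  simp [pvIsM]

lemma pv_lab_iff (s1 : List String) :
    pvLab s1 = (if pvIsM s1 then "main verb" else "auxiliary verb") := by
  unfold pvLab pvIsM
  by_cases h : ("go" ∈ s1 ∨ "do" ∈ s1)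
  · have h1 : PySem.Set.inter (PySem.Set.ofList ["go", "do"]) s1 ≠ [] := by
      rw [Ne, ← List.isEmpty_iff, Bool.not_eq_true, List.isEmpty_eq_false_iff_exists_mem]
      rcases h with h | h
      · exact ⟨"go", by rw [PySem.Set.mem_inter, PySem.Set.mem_ofList]; exact ⟨by simp, h⟩⟩
      · exact ⟨"do", by rw [PySem.Set.mem_inter, PySem.Set.mem_ofList]; exact ⟨by simp, h⟩⟩
    have h2 : PySem.Set.inter (PySem.Set.ofList s1) ["go", "do"] ≠ [] := by
      rw [Ne, ← List.isEmpty_iff, Bool.not_eq_true, List.isEmpty_eq_false_iff_exists_mem]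
      rcases h with h | h
      · exact ⟨"go", by rw [PySem.Set.mem_inter, PySem.Set.mem_ofList]; exact ⟨h, by simp⟩⟩
      · exact ⟨"do", by rw [PySem.Set.mem_inter, PySem.Set.mem_ofList]; exact ⟨h, by simp⟩⟩
    simp [h1, h2]
  · have h1 : ¬ PySem.Set.inter (PySem.Set.ofList ["go", "do"]) s1 ≠ [] := by
      rw [not_ne_iff, List.eq_nil_iff_forall_not_mem]
      intro y hy
      rw [PySem.Set.mem_inter, PySem.Set.mem_ofList] at hy
      rcases hy with ⟨ht, hs⟩
      simp only [List.mem_cons, List.not_mem_nil, or_false] at ht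
      exact h (by rcases ht with h' | h' <;> [left; right] <;> rwa [h'] at hs)
    have h2 : ¬ PySem.Set.inter (PySem.Set.ofList s1) ["go", "do"] ≠ [] := by
      rw [not_ne_iff, List.eq_nil_iff_forall_not_mem]
      intro y hy
      rw [PySem.Set.mem_inter, PySem.Set.mem_ofList] at hy
      rcases hy with ⟨hs, ht⟩
      simp only [List.mem_cons, List.not_mem_nil, or_false] at ht
      exact h (by rcases ht with h' | h' <;> [left; right] <;> rwa [h'] at hs)
    simp [h1, h2]

lemma pv_fold_mm (ps : List (List String × List String)) (m x : List (List String)) :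
    (ps.foldl pvStep ⟨[("main verb", m), ("auxiliary verb", x)]⟩).items
      = [("main verb", m ++ pvMains ps), ("auxiliary verb", x ++ pvAuxs ps)] := by
  induction ps generalizing m x with
  | nil => simp [pvMains, pvAuxs]
  | cons p ps ih =>
    by_cases h : pvIsM p.1 = true
    · have hc : PySem.Set.inter (PySem.Set.ofList p.1) ["go", "do"] ≠ [] := (pv_cond_iff p.1).mpr h
      have hstep : pvStep ⟨[("main verb", m), ("auxiliary verb", x)]⟩ p
          = ⟨[("main verb", m ++ [p.2]), ("auxiliary verb", x)]⟩ := by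
        simp [pvStep, hc, PySem.Dict.modify, PySem.Dict.insert, PySem.Dict.getD,
          PySem.Dict.get?, PySem.Dict.contains]
      rw [List.foldl_cons, hstep, ih]
      simp [pvMains, pvAuxs, h]
    · have hc : ¬ (PySem.Set.inter (PySem.Set.ofList p.1) ["go", "do"] ≠ []) := by
        rw [pv_cond_iff]; exact h
      have hstep : pvStep ⟨[("main verb", m), ("auxiliary verb", x)]⟩ p
          = ⟨[("main verb", m), ("auxiliary verb", x ++ [p.2])]⟩ := by
        simp [pvStep, hc, PySem.Dict.modify, PySem.Dict.insert, PySem.Dict.getD,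
          PySem.Dict.get?, PySem.Dict.contains]
      rw [List.foldl_cons, hstep, ih]
      simp [pvMains, pvAuxs, h]

lemma pv_fold_am (ps : List (List String × List String)) (x m : List (List String)) :
    (ps.foldl pvStep ⟨[("auxiliary verb", x), ("main verb", m)]⟩).items
      = [("auxiliary verb", x ++ pvAuxs ps), ("main verb", m ++ pvMains ps)] := by
  induction ps generalizing x m with
  | nil => simp [pvMains, pvAuxs]
  | cons p ps ih =>
    by_cases h : pvIsM p.1 = true
    · have hc : PySem.Set.inter (PySem.Set.ofList p.1) ["go", "do"] ≠ [] := (pv_cond_iff p.1).mpr h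
      have hstep : pvStep ⟨[("auxiliary verb", x), ("main verb", m)]⟩ p
          = ⟨[("auxiliary verb", x), ("main verb", m ++ [p.2])]⟩ := by
        simp [pvStep, hc, PySem.Dict.modify, PySem.Dict.insert, PySem.Dict.getD,
          PySem.Dict.get?, PySem.Dict.contains]
      rw [List.foldl_cons, hstep, ih]
      simp [pvMains, pvAuxs, h]
    · have hc : ¬ (PySem.Set.inter (PySem.Set.ofList p.1) ["go", "do"] ≠ []) := by
        rw [pv_cond_iff]; exact h
      have hstep : pvStep ⟨[("auxiliary verb", x), ("main verb", m)]⟩ p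
          = ⟨[("auxiliary verb", x ++ [p.2]), ("main verb", m)]⟩ := by
        simp [pvStep, hc, PySem.Dict.modify, PySem.Dict.insert, PySem.Dict.getD,
          PySem.Dict.get?, PySem.Dict.contains]
      rw [List.foldl_cons, hstep, ih]
      simp [pvMains, pvAuxs, h]

lemma pv_fold_m (ps : List (List String × List String)) (m : List (List String)) :
    (ps.foldl pvStep ⟨[("main verb", m)]⟩).items
      = if pvAuxs ps = [] then [("main verb", m ++ pvMains ps)]
        else [("main verb", m ++ pvMains ps), ("auxiliary verb", pvAuxs ps)] := by
  induction ps generalizing m with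
  | nil => simp [pvMains, pvAuxs]
  | cons p ps ih =>
    by_cases h : pvIsM p.1 = true
    · have hc : PySem.Set.inter (PySem.Set.ofList p.1) ["go", "do"] ≠ [] := (pv_cond_iff p.1).mpr h
      have hstep : pvStep ⟨[("main verb", m)]⟩ p = ⟨[("main verb", m ++ [p.2])]⟩ := by
        simp [pvStep, hc, PySem.Dict.modify, PySem.Dict.insert, PySem.Dict.getD,
          PySem.Dict.get?, PySem.Dict.contains]
      have hm : pvMains (p :: ps) = p.2 :: pvMains ps := by simp [pvMains, h]
      have ha : pvAuxs (p :: ps) = pvAuxs ps := by simp [pvAuxs, h]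
      rw [List.foldl_cons, hstep, ih, hm, ha]
      simp
    · have hc : ¬ (PySem.Set.inter (PySem.Set.ofList p.1) ["go", "do"] ≠ []) := by
        rw [pv_cond_iff]; exact h
      have hstep : pvStep ⟨[("main verb", m)]⟩ p
          = ⟨[("main verb", m), ("auxiliary verb", [p.2])]⟩ := by
        simp [pvStep, hc, PySem.Dict.modify, PySem.Dict.insert, PySem.Dict.getD,
          PySem.Dict.get?, PySem.Dict.contains]
      have hm : pvMains (p :: ps) = pvMains ps := by simp [pvMains, h]
      have ha : pvAuxs (p :: ps) = p.2 :: pvAuxs ps := by simp [pvAuxs, h]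
      rw [List.foldl_cons, hstep, pv_fold_mm, hm, ha]
      simp

lemma pv_fold_a (ps : List (List String × List String)) (x : List (List String)) :
    (ps.foldl pvStep ⟨[("auxiliary verb", x)]⟩).items
      = if pvMains ps = [] then [("auxiliary verb", x ++ pvAuxs ps)]
        else [("auxiliary verb", x ++ pvAuxs ps), ("main verb", pvMains ps)] := by
  induction ps generalizing x with
  | nil => simp [pvMains, pvAuxs]
  | cons p ps ih =>
    by_cases h : pvIsM p.1 = true
    · have hc : PySem.Set.inter (PySem.Set.ofList p.1) ["go", "do"] ≠ [] := (pv_cond_iff p.1).mpr h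
      have hstep : pvStep ⟨[("auxiliary verb", x)]⟩ p
          = ⟨[("auxiliary verb", x), ("main verb", [p.2])]⟩ := by
        simp [pvStep, hc, PySem.Dict.modify, PySem.Dict.insert, PySem.Dict.getD,
          PySem.Dict.get?, PySem.Dict.contains]
      have hm : pvMains (p :: ps) = p.2 :: pvMains ps := by simp [pvMains, h]
      have ha : pvAuxs (p :: ps) = pvAuxs ps := by simp [pvAuxs, h]
      rw [List.foldl_cons, hstep, pv_fold_am, hm, ha]
      simp
    · have hc : ¬ (PySem.Set.inter (PySem.Set.ofList p.1) ["go", "do"] ≠ []) := by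
        rw [pv_cond_iff]; exact h
      have hstep : pvStep ⟨[("auxiliary verb", x)]⟩ p = ⟨[("auxiliary verb", x ++ [p.2])]⟩ := by
        simp [pvStep, hc, PySem.Dict.modify, PySem.Dict.insert, PySem.Dict.getD,
          PySem.Dict.get?, PySem.Dict.contains]
      have hm : pvMains (p :: ps) = pvMains ps := by simp [pvMains, h]
      have ha : pvAuxs (p :: ps) = p.2 :: pvAuxs ps := by simp [pvAuxs, h]
      rw [List.foldl_cons, hstep, ih, hm, ha]
      simp

lemma pvA_eq_form (si so : List (List String)) :
    categorize_by_template si so = pvForm (si.zip so) := by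
  show ((si.zip so).foldl pvStep PySem.Dict.empty).items = _
  cases hp : si.zip so with
  | nil => simp [pvForm, pvMains, pvAuxs, PySem.Dict.empty]
  | cons p ps =>
    by_cases h : pvIsM p.1 = true
    · have hc : PySem.Set.inter (PySem.Set.ofList p.1) ["go", "do"] ≠ [] := (pv_cond_iff p.1).mpr h
      have hstep : pvStep PySem.Dict.empty p = ⟨[("main verb", [p.2])]⟩ := by
        simp [pvStep, hc, PySem.Dict.modify, PySem.Dict.insert, PySem.Dict.getD,
          PySem.Dict.get?, PySem.Dict.contains, PySem.Dict.empty]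
      rw [List.foldl_cons, hstep, pv_fold_m]
      have hm : pvMains (p :: ps) = p.2 :: pvMains ps := by simp [pvMains, h]
      have ha : pvAuxs (p :: ps) = pvAuxs ps := by simp [pvAuxs, h]
      by_cases hx : pvAuxs ps = []
      · simp [pvForm, hm, ha, hx]
      · simp [pvForm, hm, ha, hx, h]
    · have hc : ¬ (PySem.Set.inter (PySem.Set.ofList p.1) ["go", "do"] ≠ []) := by
        rw [pv_cond_iff]; exact h
      have hstep : pvStep PySem.Dict.empty p = ⟨[("auxiliary verb", [p.2])]⟩ := by
        simp [pvStep, hc, PySem.Dict.modify, PySem.Dict.insert, PySem.Dict.getD,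
          PySem.Dict.get?, PySem.Dict.contains, PySem.Dict.empty]
      rw [List.foldl_cons, hstep, pv_fold_a]
      have hm : pvMains (p :: ps) = pvMains ps := by simp [pvMains, h]
      have ha : pvAuxs (p :: ps) = p.2 :: pvAuxs ps := by simp [pvAuxs, h]
      by_cases hx : pvMains ps = []
      · simp [pvForm, hm, ha, hx]
      · simp [pvForm, hm, ha, hx, h]

-- zipping the mapped labels back with sentences_out recovers the labelled pairs
lemma pv_zip_map (f : List String × List String → String) :
    ∀ (si so : List (List String)),
      ((si.zip so).map f).zip so = (si.zip so).map (fun p => (f p, p.2)) := by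
  intro si
  induction si with
  | nil => intro so; simp
  | cons a si ih =>
    intro so
    cases so with
    | nil => simp
    | cons b so => simp [ih so]

-- dedup of a two-valued list (labels), in first-occurrence order
lemma pv_dedup_two (l : List String)
    (h : ∀ x ∈ l, x = "main verb" ∨ x = "auxiliary verb") :
    PySem.List.dedup l =
      if "main verb" ∈ l ∧ "auxiliary verb" ∈ l then
        (if l.headI = "main verb" then ["main verb", "auxiliary verb"]
         else ["auxiliary verb", "main verb"])
      else if "main verb" ∈ l then ["main verb"]
      else if "auxiliary verb" ∈ l then ["auxiliary verb"]
      else [] := by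
  induction l with
  | nil => simp [PySem.List.dedup]
  | cons x xs ih =>
    have hx := h x (by simp)
    have hxs : ∀ y ∈ xs, y = "main verb" ∨ y = "auxiliary verb" := fun y hy => h y (by simp [hy])
    have ihd := ih hxs
    rw [PySem.List.dedup_eq_ofList, PySem.Set.ofList_cons, ← PySem.List.dedup_eq_ofList, ihd]
    by_cases hm : "main verb" ∈ xs <;> by_cases ha : "auxiliary verb" ∈ xs <;>
      rcases hx with hx | hx <;> subst hx <;>
      by_cases hh : xs.headI = "main verb" <;>
      simp_all [PySem.Set.discard]

lemma pvB_eq_form (si so : List (List String)) :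
    categorize_by_template_alt si so = pvForm (si.zip so) := by
  show (PySem.List.dedup (((si.zip so)).map (fun p => pvLab p.1))).map
      (fun lab => (lab, (((((si.zip so)).map (fun p => pvLab p.1)).zip so).filter
        (fun q => q.1 == lab)).map Prod.snd)) = _
  set ps := si.zip so with hps
  have hlab : ∀ p : List String × List String, pvLab p.1 = (if pvIsM p.1 then "main verb" else "auxiliary verb") :=
    fun p => pv_lab_iff p.1
  have hzip : ((ps.map (fun p => pvLab p.1)).zip so) = ps.map (fun p => (pvLab p.1, p.2)) :=
    pv_zip_map (fun p => pvLab p.1) si so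
  have hfil : ∀ lab : String,
      ((ps.map (fun p => (pvLab p.1, p.2))).filter (fun q => q.1 == lab)).map Prod.snd
        = (ps.filter (fun p => pvLab p.1 == lab)).map (fun p => p.2) := by
    intro lab
    simp only [List.filter_map, List.map_map, Function.comp_def]
  have hfilM : (ps.filter (fun p => pvLab p.1 == "main verb")).map (fun p => p.2) = pvMains ps := by
    unfold pvMains
    congr 1
    apply List.filter_congr
    intro p _
    rw [hlab p]; by_cases h : pvIsM p.1 <;> simp [h]
  have hfilA : (ps.filter (fun p => pvLab p.1 == "auxiliary verb")).map (fun p => p.2) = pvAuxs ps := by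
    unfold pvAuxs
    congr 1
    apply List.filter_congr
    intro p _
    rw [hlab p]; by_cases h : pvIsM p.1 <;> simp [h]
  have hmemM : "main verb" ∈ ps.map (fun p => pvLab p.1) ↔ pvMains ps ≠ [] := by
    simp only [List.mem_map, pvMains, Ne, List.map_eq_nil_iff, List.filter_eq_nil_iff, not_forall]
    constructor
    · rintro ⟨p, hp, hl⟩
      rw [hlab p] at hl
      by_cases h : pvIsM p.1
      · exact ⟨p, hp, by simp [h]⟩
      · simp [h] at hl
    · rintro ⟨p, hp, h⟩
      exact ⟨p, hp, by rw [hlab p]; simp_all⟩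
  have hmemA : "auxiliary verb" ∈ ps.map (fun p => pvLab p.1) ↔ pvAuxs ps ≠ [] := by
    simp only [List.mem_map, pvAuxs, Ne, List.map_eq_nil_iff, List.filter_eq_nil_iff, not_forall]
    constructor
    · rintro ⟨p, hp, hl⟩
      rw [hlab p] at hl
      by_cases h : pvIsM p.1
      · simp [h] at hl
      · exact ⟨p, hp, by simp [h]⟩
    · rintro ⟨p, hp, h⟩
      refine ⟨p, hp, by rw [hlab p]; by_cases hh : pvIsM p.1 <;> simp_all⟩
  have hlall : ∀ x ∈ ps.map (fun p => pvLab p.1), x = "main verb" ∨ x = "auxiliary verb" := by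
    intro x hx
    rcases List.mem_map.mp hx with ⟨p, _, hp⟩
    rw [hlab p] at hp
    by_cases h : pvIsM p.1 <;> simp_all
  rw [pv_dedup_two _ hlall, hzip]
  unfold pvForm
  by_cases hM : pvMains ps ≠ [] <;> by_cases hA : pvAuxs ps ≠ []
  · have hmM := hmemM.mpr hM
    have hmA := hmemA.mpr hA
    obtain ⟨p, ps', hcons⟩ : ∃ p ps', ps = p :: ps' := by
      cases hc : ps with
      | nil => rw [hc] at hM; simp [pvMains] at hM
      | cons a l => exact ⟨a, l, rfl⟩
    have hhead : (ps.map (fun p => pvLab p.1)).headI = pvLab ps.headI.1 := by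
      rw [hcons]; simp
    rw [hhead, hlab ps.headI]
    by_cases h : pvIsM ps.headI.1 <;>
      simp [hM, hA, hmM, hmA, h, hfil, hfilM, hfilA]
  · simp only [not_not] at hA
    have hmM := hmemM.mpr hM
    have hmA : ¬ "auxiliary verb" ∈ ps.map (fun p => pvLab p.1) := fun h => (hmemA.mp h) hA
    simp [hM, hA, hmM, hmA, hfil, hfilM]
  · simp only [not_not] at hM
    have hmA := hmemA.mpr hA
    have hmM : ¬ "main verb" ∈ ps.map (fun p => pvLab p.1) := fun h => (hmemM.mp h) hM
    simp [hM, hA, hmM, hmA, hfil, hfilA]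
  · simp only [not_not] at hM hA
    have hmM : ¬ "main verb" ∈ ps.map (fun p => pvLab p.1) := fun h => (hmemM.mp h) hM
    have hmA : ¬ "auxiliary verb" ∈ ps.map (fun p => pvLab p.1) := fun h => (hmemA.mp h) hA
    simp [hM, hA, hmM, hmA]

-- ===== VERDICT (by name: the statement is the Claim_ definition above) =====
theorem categorize_by_template_spec : Claim_equal_categorize_by_template := by
  intro si so _
  unfold Spec_categorize_by_template
  rw [pvA_eq_form, pvB_eq_form]
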